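-- pv_equiv track=rewrite | github.com/franleplant/sintaxis_notas_de_catedra | fsa.py | asf_if
-- ===== SOURCE A (Python) =====
-- ESTADO_TRAMPA = -1
--
-- ACEPTADO = 'aceptado'
--
-- ERROR = 'error'
--
-- TRAMPA = 'trampa'
--
-- def asf_if(cadena):
--     aceptados = [2]
--     estado = 0
--     for c in cadena:
--         if estado == 0 and c == 'i':
--             estado = 1
--         elif estado == 1 and c == 'f':
--             estado = 2
--         else:
--             estado = ESTADO_TRAMPA
--             break
--
--     if estado in aceptados:
--         return ACEPTADO
--     if estado == ESTADO_TRAMPA: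
--         return TRAMPA
--     return ERROR
-- ===== SOURCE B (Python) =====
-- ESTADO_TRAMPA = -1
-- ACEPTADO = 'aceptado'
-- ERROR = 'error'
-- TRAMPA = 'trampa'
--
-- def asf_if(cadena):
--     # Closed-form classification: compare the characters directly, no state machine.
--     s = list(cadena)
--     if s == ['i', 'f']:
--         return ACEPTADO
--     if s == [] or s == ['i']:
--         return ERROR
--     return TRAMPA
-- ===== Notes on version B (the rewrite author's own statement) =====
-- stated objective: simpler
-- what changed: Replaced the character-by-character FSA loop with its state accumulator by a single closed-form comparison of the input's character list against the three possible prefixes ('if' -> aceptado, '' or 'i' -> error, anything else -> trampa).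
import Mathlib
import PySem

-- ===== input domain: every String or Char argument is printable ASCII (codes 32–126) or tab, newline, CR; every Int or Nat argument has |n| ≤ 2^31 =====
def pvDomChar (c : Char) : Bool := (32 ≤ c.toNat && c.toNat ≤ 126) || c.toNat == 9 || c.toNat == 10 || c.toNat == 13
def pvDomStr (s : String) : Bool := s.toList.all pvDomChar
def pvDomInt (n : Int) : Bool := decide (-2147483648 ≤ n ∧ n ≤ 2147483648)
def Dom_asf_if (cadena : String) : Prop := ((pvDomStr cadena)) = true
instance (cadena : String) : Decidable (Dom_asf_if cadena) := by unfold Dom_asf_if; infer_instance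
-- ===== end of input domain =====

-- B: closed-form comparison of the character list instead of A's FSA loop (simpler; same values).
-- ===== PORT A =====
-- the FSA loop: estado evolves per character; `break` on the trap state is the early return of -1
def asfIfLoop (estado : Int) (l : List Char) : Int :=
  match l with
  | [] => estado
  | c :: cs =>
      if estado = 0 ∧ c = 'i' then asfIfLoop 1 cs
      else if estado = 1 ∧ c = 'f' then asfIfLoop 2 cs
      else -1

def asf_if (cadena : String) : String :=
  let aceptados : List Int := [2]
  let estado := asfIfLoop 0 cadena.toList
  if aceptados.contains estado then "aceptado"
  else if estado = -1 then "trampa"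
  else "error"

-- ===== PORT B =====
def asf_if_alt (cadena : String) : String :=
  let s := cadena.toList
  if s = ['i', 'f'] then "aceptado"
  else if s = [] ∨ s = ['i'] then "error"
  else "trampa"

-- ===== PRECONDITION & SPEC =====
def Spec_asf_if (cadena : String) (out : String) : Prop := out = asf_if_alt cadena
instance (cadena : String) (out : String) : Decidable (Spec_asf_if cadena out) := by unfold Spec_asf_if; infer_instance

-- ===== CLAIM (what is proved, stated in full; the proofs are below) =====
def Claim_equal_asf_if : Prop := ∀ (cadena : String), Dom_asf_if cadena → Spec_asf_if cadena (asf_if cadena)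

-- ===== LEMMAS AND PROOFS =====

-- ===== VERDICT (by name: the statement is the Claim_ definition above) =====
theorem loop_eq (l : List Char) :
    (if ([2] : List Int).contains (asfIfLoop 0 l) then "aceptado"
     else if asfIfLoop 0 l = -1 then "trampa" else "error") =
    (if l = ['i', 'f'] then "aceptado"
     else if l = [] ∨ l = ['i'] then "error" else "trampa") := by
  match l with
  | [] => simp [asfIfLoop]
  | [c] =>
      by_cases h : c = 'i' <;> simp [asfIfLoop, h]
  | c :: d :: rest =>
      by_cases hc : c = 'i'
      · by_cases hd : d = 'f'
        · cases rest with
          | nil => simp [asfIfLoop, hc, hd]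
          | cons e es => simp [asfIfLoop, hc, hd]
        · simp [asfIfLoop, hc, hd]
      · simp [asfIfLoop, hc]

theorem asf_if_spec : Claim_equal_asf_if := by
  intro cadena _
  unfold Spec_asf_if asf_if asf_if_alt
  exact loop_eq cadena.toList
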